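-- pv_equiv track=rewrite | github.com/anderson115/3m-lighting-project | modules/creator-intelligence/scrapers/pinterest_scraper.py | _analyze_comment_themes
-- ===== SOURCE A (Python) =====
-- from typing import List, Dict, Optional, Any
--
-- def _analyze_comment_themes(comments: List[Dict]) -> Dict[str, List[str]]:
--     """Categorize comments into themes (questions, praise, concerns)."""
--     themes = {
--         'questions': [],
--         'praise': [],
--         'concerns': [],
--         'how_to': []
--     }
--
--     for comment in comments:
--         text = comment.get('text', '').lower()
--
--         if '?' in text or text.startswith(('how', 'what', 'where', 'when', 'why')):
--             themes['questions'].append(comment.get('text', ''))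
--         elif any(word in text for word in ['love', 'great', 'amazing', 'perfect', 'beautiful']):
--             themes['praise'].append(comment.get('text', ''))
--         elif any(word in text for word in ['but', 'however', 'issue', 'problem', 'concern']):
--             themes['concerns'].append(comment.get('text', ''))
--         elif any(word in text for word in ['how to', 'tutorial', 'diy', 'install']):
--             themes['how_to'].append(comment.get('text', ''))
--
--     return themes
-- ===== SOURCE B (Python) =====
-- def _analyze_comment_themes(comments):
--     """Categorize comments into themes: classify each text once, then build
--     each bucket with a comprehension (classifier + per-bucket filter instead
--     of one mutating pass)."""
--     def classify(text):
--         t = text.lower()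
--         if '?' in t or t.startswith(('how', 'what', 'where', 'when', 'why')):
--             return 'questions'
--         if any(w in t for w in ['love', 'great', 'amazing', 'perfect', 'beautiful']):
--             return 'praise'
--         if any(w in t for w in ['but', 'however', 'issue', 'problem', 'concern']):
--             return 'concerns'
--         if any(w in t for w in ['how to', 'tutorial', 'diy', 'install']):
--             return 'how_to'
--         return None
--     return {bucket: [c.get('text', '') for c in comments
--                      if classify(c.get('text', '')) == bucket]
--             for bucket in ('questions', 'praise', 'concerns', 'how_to')}
-- ===== Notes on version B (the rewrite author's own statement) =====
-- stated objective: alternative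
-- what changed: Replaces the single mutating pass that appends into a pre-built dict with a pure classifier function plus a dict comprehension that builds each bucket by filtering the comments on the classifier's verdict.
import Mathlib
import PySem

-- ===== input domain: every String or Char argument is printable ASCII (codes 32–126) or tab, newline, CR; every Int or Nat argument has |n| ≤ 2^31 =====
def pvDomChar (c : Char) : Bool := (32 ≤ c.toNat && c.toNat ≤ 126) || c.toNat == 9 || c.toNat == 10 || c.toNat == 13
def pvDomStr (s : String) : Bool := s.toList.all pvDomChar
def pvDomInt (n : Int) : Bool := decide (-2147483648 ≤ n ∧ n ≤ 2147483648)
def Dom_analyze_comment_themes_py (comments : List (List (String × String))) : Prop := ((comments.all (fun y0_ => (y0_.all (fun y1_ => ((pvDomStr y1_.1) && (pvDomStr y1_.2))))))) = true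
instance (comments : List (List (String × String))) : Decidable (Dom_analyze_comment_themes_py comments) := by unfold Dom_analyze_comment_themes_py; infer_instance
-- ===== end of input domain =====

-- B replaces A's single mutating pass over a pre-built dict with a pure classifier
-- plus a per-bucket comprehension; alternative decomposition, same cost.

-- comment.get('text', '') — shared accessor (dict lookup, first match)
def pvGetText (comment : List (String × String)) : String :=
  PySem.Dict.getD (PySem.Dict.mk comment) "text" ""

-- the four branch conditions, shared verbatim by both sources (t = lowered text)
def pvCond1 (t : String) : Bool :=
  PySem.Str.isIn "?" t || PySem.Str.startswith t "how" ||
  PySem.Str.startswith t "what" || PySem.Str.startswith t "where" ||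
  PySem.Str.startswith t "when" || PySem.Str.startswith t "why"
def pvCond2 (t : String) : Bool :=
  (["love", "great", "amazing", "perfect", "beautiful"] : List String).any
    (fun w => PySem.Str.isIn w t)
def pvCond3 (t : String) : Bool :=
  (["but", "however", "issue", "problem", "concern"] : List String).any
    (fun w => PySem.Str.isIn w t)
def pvCond4 (t : String) : Bool :=
  (["how to", "tutorial", "diy", "install"] : List String).any
    (fun w => PySem.Str.isIn w t)

-- ===== PORT A =====
-- themes[k].append(v) on the association-list state (hand port of the dict
-- entry mutation; exact: keys are fixed and distinct)
def pvAddTo : List (String × List String) → String → String → List (String × List String)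
  | [], _, _ => []
  | (k, vs) :: rest, key, v =>
      if k == key then (k, vs ++ [v]) :: rest
      else (k, vs) :: pvAddTo rest key v

def analyze_comment_themes_py (comments : List (List (String × String))) : List (String × List String) :=
  comments.foldl (fun themes comment =>
    let text := PySem.Str.lower (pvGetText comment)
    if pvCond1 text then pvAddTo themes "questions" (pvGetText comment)
    else if pvCond2 text then pvAddTo themes "praise" (pvGetText comment)
    else if pvCond3 text then pvAddTo themes "concerns" (pvGetText comment)
    else if pvCond4 text then pvAddTo themes "how_to" (pvGetText comment)
    else themes)
    [("questions", []), ("praise", []), ("concerns", []), ("how_to", [])]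

-- ===== PORT B =====
def pvClassify (text : String) : Option String :=
  let t := PySem.Str.lower text
  if pvCond1 t then some "questions"
  else if pvCond2 t then some "praise"
  else if pvCond3 t then some "concerns"
  else if pvCond4 t then some "how_to"
  else none

def analyze_comment_themes_py_alt (comments : List (List (String × String))) : List (String × List String) :=
  (["questions", "praise", "concerns", "how_to"] : List String).map (fun bucket =>
    (bucket, (comments.filter (fun c => pvClassify (pvGetText c) == some bucket)).map pvGetText))

-- ===== PRECONDITION & SPEC =====
def Spec_analyze_comment_themes_py (comments : List (List (String × String))) (out : List (String × List String)) : Prop := out = analyze_comment_themes_py_alt comments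
instance (comments : List (List (String × String))) (out : List (String × List String)) : Decidable (Spec_analyze_comment_themes_py comments out) := by unfold Spec_analyze_comment_themes_py; infer_instance

-- ===== CLAIM (what is proved, stated in full; the proofs are below) =====
def Claim_equal_analyze_comment_themes_py : Prop := ∀ (comments : List (List (String × String))), Dom_analyze_comment_themes_py comments → Spec_analyze_comment_themes_py comments (analyze_comment_themes_py comments)

-- ===== LEMMAS AND PROOFS =====

-- one bucket of B
def pvBucket (comments : List (List (String × String))) (bucket : String) : List String :=
  (comments.filter (fun c => pvClassify (pvGetText c) == some bucket)).map pvGetText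

theorem pv_fold_inv (cs : List (List (String × String))) (q p c h : List String) :
    cs.foldl (fun themes comment =>
      let text := PySem.Str.lower (pvGetText comment)
      if pvCond1 text then pvAddTo themes "questions" (pvGetText comment)
      else if pvCond2 text then pvAddTo themes "praise" (pvGetText comment)
      else if pvCond3 text then pvAddTo themes "concerns" (pvGetText comment)
      else if pvCond4 text then pvAddTo themes "how_to" (pvGetText comment)
      else themes)
      [("questions", q), ("praise", p), ("concerns", c), ("how_to", h)] =
    [("questions", q ++ pvBucket cs "questions"), ("praise", p ++ pvBucket cs "praise"),
     ("concerns", c ++ pvBucket cs "concerns"), ("how_to", h ++ pvBucket cs "how_to")] := by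
  induction cs generalizing q p c h with
  | nil => simp [pvBucket]
  | cons x xs ih =>
      simp only [List.foldl_cons]
      by_cases h1 : pvCond1 (PySem.Str.lower (pvGetText x))
      · simp [pvAddTo, pvBucket, pvClassify, h1, ih]
      · by_cases h2 : pvCond2 (PySem.Str.lower (pvGetText x))
        · simp [pvAddTo, pvBucket, pvClassify, h1, h2, ih]
        · by_cases h3 : pvCond3 (PySem.Str.lower (pvGetText x))
          · simp [pvAddTo, pvBucket, pvClassify, h1, h2, h3, ih]
          · by_cases h4 : pvCond4 (PySem.Str.lower (pvGetText x))
            · simp [pvAddTo, pvBucket, pvClassify, h1, h2, h3, h4, ih]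
            · simp [pvBucket, pvClassify, h1, h2, h3, h4, ih]

-- ===== VERDICT (by name: the statement is the Claim_ definition above) =====
theorem analyze_comment_themes_py_spec : Claim_equal_analyze_comment_themes_py := by
  intro comments _
  show _ = _
  rw [analyze_comment_themes_py, pv_fold_inv]
  simp [analyze_comment_themes_py_alt, pvBucket]
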